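-- pv_equiv track=rewrite | github.com/Shiwei1981/AIGovernCommercialScripting | app/services/sql_resource_parser.py | _normalize_identifier_part
-- ===== SOURCE A (Python) =====
-- def _normalize_identifier_part(value: str) -> str:
--     normalized = str(value).strip()
--     while len(normalized) >= 2 and (
--         (normalized[0] == "[" and normalized[-1] == "]")
--         or (normalized[0] == '"' and normalized[-1] == '"')
--     ):
--         normalized = normalized[1:-1].strip()
--     return normalized
-- ===== SOURCE B (Python) =====
-- def _normalize_identifier_part(value: str) -> str:
--     # Two boundary scans + one zip-match over the token lists, one final slice.
--     # `opens`  = indices of the leading run of '[' / '"' tokens (whitespace-transparent);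
--     # `closes` = indices of the trailing run of ']' / '"' tokens, from the right.
--     # Matched pairs at the same layer are exactly the wrappers A would peel.
--     s = str(value)
--     n = len(s)
--     opens = []
--     i = 0
--     while i < n:
--         if s[i].isspace():
--             i += 1
--         elif s[i] in '["':
--             opens.append(i)
--             i += 1
--         else:
--             break
--     closes = []
--     j = n
--     while j > 0:
--         if s[j - 1].isspace():
--             j -= 1
--         elif s[j - 1] in ']"':
--             closes.append(j - 1)
--             j -= 1
--         else:
--             break
--     pairs = {'[': ']', '"': '"'}
--     lo, hi = 0, n
--     for o, c in zip(opens, closes):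
--         if o < c and pairs[s[o]] == s[c]:
--             lo, hi = o + 1, c
--         else:
--             break
--     return s[lo:hi].strip()
-- ===== Notes on version B (the rewrite author's own statement) =====
-- stated objective: alternative
-- what changed: Replaces A's iterated strip-and-peel loop over shrinking strings by two independent boundary scans that collect opener/closer token index lists, a single zip-match over the two lists to find the number of matching wrapper layers, and one final slice+strip.
import Mathlib
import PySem

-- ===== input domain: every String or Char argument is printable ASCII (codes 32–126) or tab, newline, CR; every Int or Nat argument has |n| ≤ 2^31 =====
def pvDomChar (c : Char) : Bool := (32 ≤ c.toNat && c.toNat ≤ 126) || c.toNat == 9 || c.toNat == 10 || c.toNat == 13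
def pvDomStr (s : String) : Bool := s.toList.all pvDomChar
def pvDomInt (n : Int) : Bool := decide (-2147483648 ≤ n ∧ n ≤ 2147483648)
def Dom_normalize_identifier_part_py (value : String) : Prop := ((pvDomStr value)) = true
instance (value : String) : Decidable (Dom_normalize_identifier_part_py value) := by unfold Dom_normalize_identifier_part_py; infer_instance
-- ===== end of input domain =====

-- B replaces A's iterated strip-and-peel loop by two boundary token scans, one
-- zip-match over the two token lists, and a single final slice+strip (objective: alternative).

-- ===== PORT A =====

-- length facts A's loop needs for termination
theorem pv_strip_len_le (s : List Char) : (PySem.Chars.strip s).length ≤ s.length := by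
  simp only [PySem.Chars.strip, PySem.Chars.rstrip, PySem.Chars.lstrip, List.length_reverse]
  exact le_trans (List.length_dropWhile_le _ _)
    (by simpa using List.length_dropWhile_le PySem.Chars.isspace s)

-- xs[1:-1] as tail/dropLast (Python clamping: empty for len ≤ 1)
theorem pv_slice_one_neg_one (xs : List Char) :
    PySem.List.slice xs (some 1) (some (-1)) = xs.tail.dropLast := by
  cases xs with
  | nil => rfl
  | cons x t =>
    simp [PySem.List.slice, PySem.List.clampIdx, List.dropLast_eq_take]
    split <;> omega

-- the `while` of A: test `len ≥ 2 and (matching pair)`, then peel and re-strip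
def aLoop (cs : List Char) : List Char :=
  if 2 ≤ cs.length ∧
      ((PySem.List.pyGet? cs 0 = some '[' ∧ PySem.List.pyGet? cs (-1) = some ']') ∨
       (PySem.List.pyGet? cs 0 = some '"' ∧ PySem.List.pyGet? cs (-1) = some '"')) then
    aLoop (PySem.Chars.strip (PySem.List.slice cs (some 1) (some (-1))))
  else cs
termination_by cs.length
decreasing_by
  rename_i h
  rw [pv_slice_one_neg_one]
  have h2 := pv_strip_len_le cs.tail.dropLast
  have h3 : cs.tail.dropLast.length = cs.length - 1 - 1 := by simp
  omega

def normalize_identifier_part_py (value : String) : String :=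
  String.ofList (aLoop (PySem.Str.strip value).toList)

-- ===== PORT B =====

-- `while i < n: skip whitespace, collect '[' / '"' token indices, else break`
def scanL (cs : List Char) (i : Nat) : List Nat :=
  if h : i < cs.length then
    if PySem.Chars.isspace (cs.getD i ' ') then scanL cs (i + 1)
    else if cs.getD i ' ' = '[' ∨ cs.getD i ' ' = '"' then i :: scanL cs (i + 1)
    else []
  else []
termination_by cs.length - i
decreasing_by all_goals omega

-- `while j > 0: skip whitespace, collect ']' / '"' token indices from the right, else break`
def scanR (cs : List Char) (j : Nat) : List Nat :=
  if h : 0 < j then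
    if PySem.Chars.isspace (cs.getD (j - 1) ' ') then scanR cs (j - 1)
    else if cs.getD (j - 1) ' ' = ']' ∨ cs.getD (j - 1) ' ' = '"' then (j - 1) :: scanR cs (j - 1)
    else []
  else []
termination_by j
decreasing_by all_goals omega

-- the `for o, c in zip(opens, closes)` match loop; `pairs[s[o]] == s[c]` written
-- out as the two cases of the dict (s[o] is '[' or '"' by construction of opens)
def peel (cs : List Char) : List Nat → List Nat → Nat → Nat → Nat × Nat
  | o :: os, c :: cls, lo, hi =>
    if o < c ∧ ((cs.getD o ' ' = '[' ∧ cs.getD c ' ' = ']') ∨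
                (cs.getD o ' ' = '"' ∧ cs.getD c ' ' = '"')) then
      peel cs os cls (o + 1) c
    else (lo, hi)
  | _, _, lo, hi => (lo, hi)

def normalize_identifier_part_py_alt (value : String) : String :=
  let cs := value.toList
  let p := peel cs (scanL cs 0) (scanR cs cs.length) 0 cs.length
  String.ofList (PySem.Chars.strip (PySem.List.slice cs (some (p.1 : Int)) (some (p.2 : Int))))

-- ===== PRECONDITION & SPEC =====
def Spec_normalize_identifier_part_py (value : String) (out : String) : Prop := out = normalize_identifier_part_py_alt value
instance (value : String) (out : String) : Decidable (Spec_normalize_identifier_part_py value out) := by unfold Spec_normalize_identifier_part_py; infer_instance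

-- ===== CLAIM (what is proved, stated in full; the proofs are below) =====
def Claim_equal_normalize_identifier_part_py : Prop := ∀ (value : String), Dom_normalize_identifier_part_py value → Spec_normalize_identifier_part_py value (normalize_identifier_part_py value)

-- ===== LEMMAS AND PROOFS =====

-- the window s[i:j] for natural bounds i ≤ j ≤ len
def win (cs : List Char) (i j : Nat) : List Char := (cs.drop i).take (j - i)

theorem win_cons (cs : List Char) {i j : Nat} (hij : i < j) (hj : j ≤ cs.length) :
    win cs i j = cs.getD i ' ' :: win cs (i + 1) j := by
  have hi : i < cs.length := lt_of_lt_of_le hij hj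
  unfold win
  rw [List.drop_eq_getElem_cons hi, List.getD_eq_getElem cs ' ' hi]
  have h : j - i = (j - (i + 1)) + 1 := by omega
  rw [h, List.take_succ_cons]

theorem win_snoc (cs : List Char) {i j : Nat} (hij : i < j) (hj : j ≤ cs.length) :
    win cs i j = win cs i (j - 1) ++ [cs.getD (j - 1) ' '] := by
  have hj1 : j - 1 < cs.length := by omega
  unfold win
  have h : j - i = (j - 1 - i) + 1 := by omega
  rw [h, List.take_add_one]
  have hg : (cs.drop i)[j - 1 - i]? = some (cs.getD (j - 1) ' ') := by
    rw [List.getElem?_drop]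
    have h2 : i + (j - 1 - i) = j - 1 := by omega
    rw [h2, List.getElem?_eq_getElem hj1, List.getD_eq_getElem cs ' ' hj1]
  rw [hg]
  rfl

theorem win_len (cs : List Char) {i j : Nat} (hj : j ≤ cs.length) :
    (win cs i j).length = j - i := by
  unfold win
  simp
  omega

-- proof-side index form of `strip`: skip whitespace from the left / right of a window
def skipL (cs : List Char) (i j : Nat) : Nat :=
  if h : i < j ∧ PySem.Chars.isspace (cs.getD i ' ') then skipL cs (i + 1) j else i
termination_by j - i
decreasing_by omega

def skipR (cs : List Char) (i j : Nat) : Nat :=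
  if h : i < j ∧ PySem.Chars.isspace (cs.getD (j - 1) ' ') then skipR cs i (j - 1) else j
termination_by j - i
decreasing_by omega

theorem skipL_ge (cs : List Char) (i j : Nat) : i ≤ skipL cs i j := by
  fun_induction skipL cs i j with
  | case1 i h ih => omega
  | case2 i h => omega

theorem skipR_le (cs : List Char) (i j : Nat) : skipR cs i j ≤ j := by
  fun_induction skipR cs i j with
  | case1 j h ih => omega
  | case2 j h => omega

theorem skipL_le (cs : List Char) {i j : Nat} (hij : i ≤ j) : skipL cs i j ≤ j := by
  fun_induction skipL cs i j with
  | case1 i h ih => exact ih (by omega)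
  | case2 i h => omega

theorem skipR_ge (cs : List Char) {i j : Nat} (hij : i ≤ j) : i ≤ skipR cs i j := by
  fun_induction skipR cs i j with
  | case1 j h ih => exact ih (by omega)
  | case2 j h => omega

theorem skipL_spaces (cs : List Char) (i j : Nat) :
    ∀ m, i ≤ m → m < skipL cs i j → PySem.Chars.isspace (cs.getD m ' ') := by
  fun_induction skipL cs i j with
  | case1 i h ih =>
    intro m hm1 hm2
    rcases Nat.eq_or_lt_of_le hm1 with he | hlt
    · subst he; exact h.2
    · exact ih m hlt hm2
  | case2 i h => intro m hm1 hm2; omega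

theorem skipR_spaces (cs : List Char) (i j : Nat) :
    ∀ m, skipR cs i j ≤ m → m < j → PySem.Chars.isspace (cs.getD m ' ') := by
  fun_induction skipR cs i j with
  | case1 j h ih =>
    intro m hm1 hm2
    rcases Nat.lt_or_ge m (j - 1) with hlt | hge
    · exact ih m hm1 hlt
    · have : m = j - 1 := by omega
      subst this; exact h.2
  | case2 j h => intro m hm1 hm2; omega

theorem skipL_eq (cs : List Char) {i j p : Nat} (hip : i ≤ p) (hpj : p ≤ j)
    (hsp : ∀ m, i ≤ m → m < p → PySem.Chars.isspace (cs.getD m ' '))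
    (hstop : p = j ∨ ¬ PySem.Chars.isspace (cs.getD p ' ')) :
    skipL cs i j = p := by
  fun_induction skipL cs i j with
  | case1 i h ih =>
    rcases Nat.eq_or_lt_of_le hip with he | hlt
    · subst he
      rcases hstop with he2 | hns
      · exact absurd h.1 (by omega)
      · exact absurd h.2 hns
    · exact ih hlt (fun m hm1 hm2 => hsp m (by omega) hm2)
  | case2 i h =>
    rcases Nat.eq_or_lt_of_le hip with he | hlt
    · omega
    · exact absurd ⟨by omega, hsp i le_rfl hlt⟩ h

theorem skipR_eq (cs : List Char) {i j p : Nat} (hip : i ≤ p) (hpj : p ≤ j)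
    (hsp : ∀ m, p ≤ m → m < j → PySem.Chars.isspace (cs.getD m ' '))
    (hstop : p = i ∨ ¬ PySem.Chars.isspace (cs.getD (p - 1) ' ')) :
    skipR cs i j = p := by
  fun_induction skipR cs i j with
  | case1 j h ih =>
    rcases Nat.eq_or_lt_of_le hpj with he | hlt
    · subst he
      rcases hstop with he2 | hns
      · exact absurd h.1 (by omega)
      · exact absurd h.2 hns
    · exact ih (by omega) (fun m hm1 hm2 => hsp m hm1 (by omega))
  | case2 j h =>
    rcases Nat.eq_or_lt_of_le hpj with he | hlt
    · omega
    · exact absurd ⟨by omega, hsp (j - 1) (by omega) (by omega)⟩ h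

theorem win_skipL (cs : List Char) {i j : Nat} (hij : i ≤ j) (hj : j ≤ cs.length) :
    win cs (skipL cs i j) j = (win cs i j).dropWhile PySem.Chars.isspace := by
  fun_induction skipL cs i j with
  | case1 i h ih =>
    rw [win_cons cs h.1 hj, List.dropWhile_cons_of_pos h.2]
    exact ih (by omega)
  | case2 i h =>
    rcases Nat.lt_or_ge i j with hlt | hge
    · rw [win_cons cs hlt hj, List.dropWhile_cons_of_neg (by tauto)]
    · have he : i = j := le_antisymm hij hge
      subst he
      unfold win
      simp

theorem win_skipR (cs : List Char) {i j : Nat} (hij : i ≤ j) (hj : j ≤ cs.length) :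
    win cs i (skipR cs i j) = ((win cs i j).reverse.dropWhile PySem.Chars.isspace).reverse := by
  fun_induction skipR cs i j with
  | case1 j h ih =>
    rw [win_snoc cs h.1 hj, List.reverse_append, List.reverse_singleton,
        List.singleton_append, List.dropWhile_cons_of_pos h.2]
    exact ih (by omega) (by omega)
  | case2 j h =>
    rcases Nat.lt_or_ge i j with hlt | hge
    · rw [win_snoc cs hlt hj, List.reverse_append, List.reverse_singleton,
          List.singleton_append, List.dropWhile_cons_of_neg (by tauto),
          List.reverse_cons, List.reverse_reverse, ← win_snoc cs hlt hj]
    · have he : i = j := le_antisymm hij hge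
      subst he
      unfold win
      simp

theorem strip_win (cs : List Char) {i j : Nat} (hij : i ≤ j) (hj : j ≤ cs.length) :
    PySem.Chars.strip (win cs i j) = win cs (skipL cs i j) (skipR cs (skipL cs i j) j) := by
  have h2 := skipL_le cs hij
  rw [PySem.Chars.strip, PySem.Chars.lstrip, ← win_skipL cs hij hj,
      PySem.Chars.rstrip, ← win_skipR cs h2 hj]

-- the scans are transparent to leading/trailing whitespace
theorem scanL_congr (cs : List Char) (k : Nat) :
    ∀ i p, p - i ≤ k → i ≤ p → p ≤ cs.length →
      (∀ m, i ≤ m → m < p → PySem.Chars.isspace (cs.getD m ' ')) →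
      scanL cs i = scanL cs p := by
  induction k with
  | zero =>
    intro i p hk hip hp hsp
    have : i = p := by omega
    subst this; rfl
  | succ n ih =>
    intro i p hk hip hp hsp
    rcases Nat.eq_or_lt_of_le hip with he | hlt
    · subst he; rfl
    · rw [scanL, dif_pos (by omega), if_pos (hsp i le_rfl hlt)]
      exact ih (i + 1) p (by omega) (by omega) hp (fun m hm1 hm2 => hsp m (by omega) hm2)

theorem scanR_congr (cs : List Char) (k : Nat) :
    ∀ p j, j - p ≤ k → p ≤ j →
      (∀ m, p ≤ m → m < j → PySem.Chars.isspace (cs.getD m ' ')) →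
      scanR cs j = scanR cs p := by
  induction k with
  | zero =>
    intro p j hk hpj hsp
    have : j = p := by omega
    subst this; rfl
  | succ n ih =>
    intro p j hk hpj hsp
    rcases Nat.eq_or_lt_of_le hpj with he | hlt
    · subst he; rfl
    · rw [scanR, dif_pos (by omega), if_pos (hsp (j - 1) (by omega) (by omega))]
      exact ih p (j - 1) (by omega) (by omega) (fun m hm1 hm2 => hsp m hm1 (by omega))

-- characterization of a head token of scanL / scanR, and of an empty scan
theorem scanL_cons (cs : List Char) {i o : Nat} {os : List Nat} (h : scanL cs i = o :: os) :
    i ≤ o ∧ o < cs.length ∧ (∀ m, i ≤ m → m < o → PySem.Chars.isspace (cs.getD m ' ')) ∧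
      ¬ PySem.Chars.isspace (cs.getD o ' ') ∧
      (cs.getD o ' ' = '[' ∨ cs.getD o ' ' = '"') ∧ os = scanL cs (o + 1) := by
  fun_induction scanL cs i with
  | case1 i h1 h2 ih =>
    obtain ⟨a, b, c, d, e, f⟩ := ih h
    exact ⟨by omega, b, fun m hm1 hm2 => by
      rcases Nat.eq_or_lt_of_le hm1 with he | hlt
      · subst he; exact h2
      · exact c m hlt hm2, d, e, f⟩
  | case2 i h1 h2 h3 =>
    injection h with h4 h5
    subst h4
    exact ⟨le_rfl, h1, fun m hm1 hm2 => by omega, h2, h3, h5.symm⟩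
  | case3 i h1 h2 h3 => simp at h
  | case4 i h1 => simp at h

theorem scanR_cons (cs : List Char) {j c : Nat} {cls : List Nat} (h : scanR cs j = c :: cls) :
    c < j ∧ (∀ m, c < m → m < j → PySem.Chars.isspace (cs.getD m ' ')) ∧
      ¬ PySem.Chars.isspace (cs.getD c ' ') ∧
      (cs.getD c ' ' = ']' ∨ cs.getD c ' ' = '"') ∧ cls = scanR cs c := by
  fun_induction scanR cs j with
  | case1 j h1 h2 ih =>
    obtain ⟨a, b, d, e, f⟩ := ih h
    exact ⟨by omega, fun m hm1 hm2 => by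
      rcases Nat.lt_or_ge m (j - 1) with hlt | hge
      · exact b m hm1 hlt
      · have : m = j - 1 := by omega
        subst this; exact h2, d, e, f⟩
  | case2 j h1 h2 h3 =>
    injection h with h4 h5
    subst h4
    exact ⟨by omega, fun m hm1 hm2 => by omega, h2, h3, h5.symm⟩
  | case3 j h1 h2 h3 => simp at h
  | case4 j h1 => simp at h

-- A = B on every window: B's token matching performs exactly A's peels
theorem peel_eq_aLoop (cs : List Char) (n : Nat) :
    ∀ i j, j - i ≤ n → i ≤ j → j ≤ cs.length →
      PySem.Chars.strip (win cs (peel cs (scanL cs i) (scanR cs j) i j).1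
                                 (peel cs (scanL cs i) (scanR cs j) i j).2)
        = aLoop (PySem.Chars.strip (win cs i j)) := by
  induction n with
  | zero =>
    intro i j hn hij hj
    have he : i = j := by omega
    subst he
    have hpeel : peel cs (scanL cs i) (scanR cs i) i i = (i, i) := by
      cases hL : scanL cs i with
      | nil => cases hR : scanR cs i <;> rfl
      | cons o os =>
        cases hR : scanR cs i with
        | nil => rfl
        | cons c cls =>
          simp only [peel]
          rw [if_neg]
          rintro ⟨hoc, -⟩
          have h1 := (scanL_cons cs hL).1
          have h2 := (scanR_cons cs hR).1
          omega
    rw [hpeel]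
    have hw : win cs i i = [] := by unfold win; simp
    rw [hw]
    have hs : PySem.Chars.strip ([] : List Char) = [] := rfl
    rw [hs, aLoop.eq_def, if_neg (fun hcon => absurd hcon.1 (by simp))]
  | succ n ih =>
    intro i j hn hij hj
    have hi1 : i ≤ skipL cs i j := skipL_ge cs i j
    have hi2 : skipL cs i j ≤ j := skipL_le cs hij
    have hj1 : skipL cs i j ≤ skipR cs (skipL cs i j) j := skipR_ge cs hi2
    have hj2 : skipR cs (skipL cs i j) j ≤ j := skipR_le cs (skipL cs i j) j
    have hstrip := strip_win cs hij hj
    set i' := skipL cs i j with hi'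
    set j' := skipR cs i' j with hj'
    have hjlen : j' ≤ cs.length := le_trans hj2 hj
    have hlen : (win cs i' j').length = j' - i' := win_len cs hjlen
    have key : 2 ≤ j' - i' →
        PySem.List.pyGet? (win cs i' j') 0 = some (cs.getD i' ' ') ∧
        PySem.List.pyGet? (win cs i' j') (-1) = some (cs.getD (j' - 1) ' ') := by
      intro h2
      constructor
      · rw [win_cons cs (by omega) hjlen]
        exact PySem.List.pyGet?_zero_cons _ _
      · rw [win_snoc cs (by omega) hjlen]
        exact PySem.List.pyGet?_neg_one_append_singleton _ _
    have hguard : (2 ≤ (win cs i' j').length ∧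
        ((PySem.List.pyGet? (win cs i' j') 0 = some '[' ∧ PySem.List.pyGet? (win cs i' j') (-1) = some ']') ∨
         (PySem.List.pyGet? (win cs i' j') 0 = some '"' ∧ PySem.List.pyGet? (win cs i' j') (-1) = some '"'))) ↔
        (2 ≤ j' - i' ∧
        ((cs.getD i' ' ' = '[' ∧ cs.getD (j' - 1) ' ' = ']') ∨
         (cs.getD i' ' ' = '"' ∧ cs.getD (j' - 1) ' ' = '"'))) := by
      constructor
      · rintro ⟨ha, hb⟩
        have h2 : 2 ≤ j' - i' := by omega
        obtain ⟨hh, hl⟩ := key h2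
        rw [hh, hl] at hb
        simp only [Option.some.injEq] at hb
        exact ⟨h2, hb⟩
      · rintro ⟨ha, hb⟩
        obtain ⟨hh, hl⟩ := key ha
        refine ⟨by omega, ?_⟩
        rw [hh, hl]
        simp only [Option.some.injEq]
        exact hb
    by_cases hG : 2 ≤ j' - i' ∧
        ((cs.getD i' ' ' = '[' ∧ cs.getD (j' - 1) ' ' = ']') ∨
         (cs.getD i' ' ' = '"' ∧ cs.getD (j' - 1) ' ' = '"'))
    · -- a wrapper layer matches: both sides peel it and we recurse on the inner window
      have hnsL : ¬ PySem.Chars.isspace (cs.getD i' ' ') := by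
        rcases hG.2 with ⟨h1, -⟩ | ⟨h1, -⟩ <;> rw [h1] <;> decide
      have hnsR : ¬ PySem.Chars.isspace (cs.getD (j' - 1) ' ') := by
        rcases hG.2 with ⟨-, h1⟩ | ⟨-, h1⟩ <;> rw [h1] <;> decide
      have hopL : cs.getD i' ' ' = '[' ∨ cs.getD i' ' ' = '"' := by tauto
      have hclR : cs.getD (j' - 1) ' ' = ']' ∨ cs.getD (j' - 1) ' ' = '"' := by tauto
      have hsl : scanL cs i = i' :: scanL cs (i' + 1) := by
        rw [scanL_congr cs (i' - i) i i' (by omega) hi1 (by omega) (skipL_spaces cs i j)]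
        rw [scanL, dif_pos (by omega), if_neg hnsL, if_pos hopL]
      have hsr : scanR cs j = (j' - 1) :: scanR cs (j' - 1) := by
        rw [scanR_congr cs (j - j') j' j (by omega) hj2 (skipR_spaces cs i' j)]
        rw [scanR, dif_pos (by omega), if_neg hnsR, if_pos hclR]
      rw [hsl, hsr]
      simp only [peel]
      rw [if_pos ⟨by omega, hG.2⟩]
      rw [hstrip, aLoop.eq_def, if_pos (hguard.mpr hG), pv_slice_one_neg_one]
      have h2i : i' < j' := by omega
      have hwv : (win cs i' j').tail = win cs (i' + 1) j' := by
        rw [win_cons cs h2i hjlen]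
        rfl
      have hwd : win cs (i' + 1) j' = win cs (i' + 1) (j' - 1) ++ [cs.getD (j' - 1) ' '] :=
        win_snoc cs (by omega) hjlen
      rw [hwv, hwd, List.dropLast_concat]
      exact ih (i' + 1) (j' - 1) (by omega) (by omega) (by omega)
    · -- no layer matches: peel stops at (i, j) and A's loop guard fails too
      have hpeel : peel cs (scanL cs i) (scanR cs j) i j = (i, j) := by
        cases hL : scanL cs i with
        | nil => cases hR : scanR cs j <;> rfl
        | cons o os =>
          cases hR : scanR cs j with
          | nil => rfl
          | cons c cls =>
            simp only [peel]
            rw [if_neg]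
            rintro ⟨hoc, hpair⟩
            obtain ⟨hio, holen, hspo, hnso, -, -⟩ := scanL_cons cs hL
            obtain ⟨hcj, hspc, hnsc, -, -⟩ := scanR_cons cs hR
            have e1 : skipL cs i j = o :=
              skipL_eq cs hio (by omega) hspo (Or.inr hnso)
            have e2 : skipR cs o j = c + 1 :=
              skipR_eq cs (by omega) (by omega)
                (fun m hm1 hm2 => hspc m (by omega) hm2) (Or.inr hnsc)
            apply hG
            rw [hi', e1, hj', hi', e1, e2]
            exact ⟨by omega, hpair⟩
      rw [hpeel, hstrip]
      rw [aLoop.eq_def, if_neg (fun hA => hG (hguard.mp hA))]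

-- ===== VERDICT (by name: the statement is the Claim_ definition above) =====
theorem normalize_identifier_part_py_spec : Claim_equal_normalize_identifier_part_py := by
  intro value _
  unfold Spec_normalize_identifier_part_py
  have h := peel_eq_aLoop value.toList value.toList.length 0 value.toList.length
    (by omega) (by omega) (by omega)
  have hw : win value.toList 0 value.toList.length = value.toList := by
    unfold win; simp
  rw [hw] at h
  simp only [win] at h
  simp only [normalize_identifier_part_py, normalize_identifier_part_py_alt,
    PySem.List.slice_natCast]
  rw [PySem.Str.toList_strip, ← h]
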